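-- pv_equiv track=rewrite | github.com/HeliosHuang/SeIoT | Iaf_extractor.py | _str2tuple
-- ===== SOURCE A (Python) =====
-- def _str2tuple(key):
--     a = []
--     back = 0
--     for num, i in enumerate(key):
--         if i == ',' or i == ')':
--             fore = back + 1
--             back = num
--             try:
--                 a.append(int(key[fore:back]))
--             except:
--                 pass
--     return tuple(a)
-- ===== SOURCE B (Python) =====
-- def _str2tuple(key):
--     # One pass over key[1:] with an explicit token buffer instead of index slicing.
--     result = []
--     buf = ""
--     for ch in key[1:]:
--         if ch == ',' or ch == ')':
--             try:
--                 result.append(int(buf))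
--             except Exception:
--                 pass
--             buf = ""
--         else:
--             buf += ch
--     return tuple(result)
-- ===== Notes on version B (the rewrite author's own statement) =====
-- stated objective: simpler
-- what changed: B replaces A's index bookkeeping (back/fore counters and slices into the original string) with a single pass over the tail of the key that accumulates a token buffer and flushes it at each delimiter character.
import Mathlib
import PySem

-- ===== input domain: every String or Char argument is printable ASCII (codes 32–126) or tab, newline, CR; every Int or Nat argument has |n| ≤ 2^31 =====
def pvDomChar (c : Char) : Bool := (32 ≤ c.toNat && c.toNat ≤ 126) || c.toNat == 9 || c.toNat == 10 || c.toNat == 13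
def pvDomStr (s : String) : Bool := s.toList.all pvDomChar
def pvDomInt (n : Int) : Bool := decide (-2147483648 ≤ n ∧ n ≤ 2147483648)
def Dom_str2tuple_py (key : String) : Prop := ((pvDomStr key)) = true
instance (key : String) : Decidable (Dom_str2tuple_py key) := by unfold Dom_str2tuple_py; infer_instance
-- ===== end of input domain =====

-- B replaces A's index/slice bookkeeping with a one-pass token buffer over key[1:]; return values proved equal.

-- ===== PORT A =====
-- one loop step of A: on a delimiter char, try int(key[fore:back]) and update back
def str2tuple_py_step (cs : List Char) (st : List Int × Int) (p : Int × Char) : List Int × Int :=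
  let a := st.1
  let back := st.2
  let num := p.1
  let i := p.2
  if i = ',' ∨ i = ')' then
    let fore := back + 1
    match PySem.Int.ofChars? (PySem.List.slice cs (some fore) (some num)) with
    | some v => (a ++ [v], num)
    | none => (a, num)
  else (a, back)

def str2tuple_py (key : String) : List Int :=
  (List.foldl (str2tuple_py_step key.toList) ([], 0) (PySem.List.enumerate key.toList)).1

-- ===== PORT B =====
-- one loop step of B: flush the buffer at a delimiter char, else extend it
def str2tuple_py_alt_step (st : List Int × List Char) (ch : Char) : List Int × List Char :=
  if ch = ',' ∨ ch = ')' then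
    (match PySem.Int.ofChars? st.2 with
     | some v => st.1 ++ [v]
     | none => st.1, [])
  else (st.1, st.2 ++ [ch])

def str2tuple_py_alt (key : String) : List Int :=
  (List.foldl str2tuple_py_alt_step ([], []) (PySem.List.slice key.toList (some 1) none)).1

-- ===== PRECONDITION & SPEC =====
def Spec_str2tuple_py (key : String) (out : List Int) : Prop := out = str2tuple_py_alt key
instance (key : String) (out : List Int) : Decidable (Spec_str2tuple_py key out) := by unfold Spec_str2tuple_py; infer_instance

-- ===== CLAIM (what is proved, stated in full; the proofs are below) =====
def Claim_equal_str2tuple_py : Prop := ∀ (key : String), Dom_str2tuple_py key → Spec_str2tuple_py key (str2tuple_py key)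

-- ===== LEMMAS AND PROOFS =====

-- A's slice key[back+1:num] is exactly B's current buffer, maintained as an invariant.
lemma str2tuple_loops_eq (cs : List Char) :
    ∀ (suf : List Char) (n : Nat) (a : List Int) (b : Nat),
    cs.drop n = suf → b + 1 ≤ n →
    (List.foldl (str2tuple_py_step cs) (a, (b : Int)) (PySem.List.enumerate suf (n : Int))).1
      = (List.foldl str2tuple_py_alt_step (a, (cs.drop (b+1)).take (n - (b+1))) suf).1 := by
  intro suf
  induction suf with
  | nil => intro n a b _ _; simp [PySem.List.enumerate]
  | cons ch suf' ih =>
    intro n a b hdrop hb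
    have hdrop' : cs.drop (n+1) = suf' := by
      rw [← List.drop_drop, hdrop]; rfl
    rw [PySem.List.enumerate_cons]
    simp only [List.foldl_cons]
    by_cases hd : ch = ',' ∨ ch = ')'
    · have hslice : PySem.List.slice cs (some ((b : Int) + 1)) (some (n : Int))
          = (cs.drop (b+1)).take (n - (b+1)) := by
        have : ((b : Int) + 1) = ((b + 1 : Nat) : Int) := by push_cast; ring
        rw [this, PySem.List.slice_natCast]
      have hA : str2tuple_py_step cs (a, (b : Int)) ((n : Int), ch)
          = ((match PySem.Int.ofChars? ((cs.drop (b+1)).take (n - (b+1))) with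
              | some v => a ++ [v] | none => a), (n : Int)) := by
        simp only [str2tuple_py_step, if_pos hd, hslice]
        cases PySem.Int.ofChars? ((cs.drop (b+1)).take (n - (b+1))) <;> rfl
      have hB : str2tuple_py_alt_step (a, (cs.drop (b+1)).take (n - (b+1))) ch
          = ((match PySem.Int.ofChars? ((cs.drop (b+1)).take (n - (b+1))) with
              | some v => a ++ [v] | none => a), ([] : List Char)) := by
        simp only [str2tuple_py_alt_step, if_pos hd]
      rw [hA, hB]
      have := ih (n+1) (match PySem.Int.ofChars? ((cs.drop (b+1)).take (n - (b+1))) with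
              | some v => a ++ [v] | none => a) n hdrop' (by omega)
      simpa using this
    · have hA : str2tuple_py_step cs (a, (b : Int)) ((n : Int), ch) = (a, (b : Int)) := by
        simp only [str2tuple_py_step, if_neg hd]
      have hbufext : (cs.drop (b+1)).take (n + 1 - (b+1))
          = (cs.drop (b+1)).take (n - (b+1)) ++ [ch] := by
        have hlen : n < cs.length := by
          by_contra h
          push Not at h
          rw [List.drop_eq_nil_of_le h] at hdrop
          exact (List.cons_ne_nil ch suf') hdrop.symm
        have hget : (cs.drop (b+1))[n - (b+1)]? = some ch := by
          rw [List.getElem?_drop]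
          have : b + 1 + (n - (b+1)) = n := by omega
          rw [this]
          have : cs[n]? = some ch := by
            have := congrArg (·[0]?) hdrop
            simpa [List.getElem?_drop] using this
          exact this
        have : n + 1 - (b+1) = (n - (b+1)) + 1 := by omega
        rw [this, List.take_add_one, hget]
        rfl
      have hB : str2tuple_py_alt_step (a, (cs.drop (b+1)).take (n - (b+1))) ch
          = (a, (cs.drop (b+1)).take (n + 1 - (b+1))) := by
        simp only [str2tuple_py_alt_step, if_neg hd, hbufext]
      rw [hA, hB]
      exact ih (n+1) a b hdrop' (by omega)

-- ===== VERDICT (by name: the statement is the Claim_ definition above) =====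
theorem str2tuple_py_spec : Claim_equal_str2tuple_py := by
  intro key _
  unfold Spec_str2tuple_py str2tuple_py str2tuple_py_alt
  cases hcs : key.toList with
  | nil => simp [PySem.List.enumerate, PySem.List.slice_from_one]
  | cons c rest =>
    rw [PySem.List.slice_from_one]
    have hrest : (c :: rest).drop 1 = rest := rfl
    have h0 : str2tuple_py_step (c :: rest) (([] : List Int), 0) ((0 : Int), c)
        = (([] : List Int), (0 : Int)) := by
      simp only [str2tuple_py_step]
      by_cases hd : c = ',' ∨ c = ')'
      · rw [if_pos hd]
        have : PySem.List.slice (c :: rest) (some ((0:Int) + 1)) (some (0 : Int)) = [] := by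
          have h1 : ((0:Int) + 1) = ((1 : Nat) : Int) := by norm_num
          have h2 : (0 : Int) = ((0 : Nat) : Int) := by norm_num
          rw [h1, h2, PySem.List.slice_natCast]
          simp
        rw [this]
        rfl
      · rw [if_neg hd]
    rw [show PySem.List.enumerate (c :: rest) = PySem.List.enumerate (c :: rest) 0 from rfl,
        PySem.List.enumerate_cons]
    simp only [List.foldl_cons, h0]
    have := str2tuple_loops_eq (c :: rest) rest 1 [] 0 hrest (by omega)
    simpa using this
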